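-- pv_equiv track=rewrite | github.com/jongmung/Coding_Study | studyct.py | solution
-- ===== SOURCE A (Python) =====
-- from itertools import combinations, product
-- from itertools import product
--
-- def solution(clockHands):
--     answer = 9876543210
--     n = len(clockHands)
--     dy = [-1, 1, 0, 0, 0]
--     dx = [0, 0, -1, 1, 0]
--
--     def rotate(a, b, t, arr):
--         for k in range(5):
--             y, x = a + dy[k], b + dx[k]
--             if 0 <= y < n and 0 <= x < n:
--                 arr[y][x] = (arr[y][x] + t) % 4
--
--     for case in product(range(4), repeat=n):    # 첫째줄 최대4번까지 회전 한다는 가정 하에 모든 경우의 수를 만든다.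
--         arr = [i[:] for i in clockHands]    # 깊은 복사는 deepcopy 보다 slicing 이 빠름
--
--         for j in range(n):    # case 를 가지고 첫번째 줄만 회전 시킨다
--             rotate(0, j, case[j], arr)
--
--         result = sum(case)    # 첫번째 줄 조작 횟수의 합
--
--         for i in range(1, n):    # 두번째 줄부터 체크
--             for j in range(n):
--                 if arr[i-1][j]:    # 12시 가있지 않은 시계만 조작
--                     temp = 4 - arr[i-1][j]    # 12시에 가도록 하기 위한 조작 횟수
--                     rotate(i, j, temp, arr)    # 회전
--                     result += temp    # 조작 횟수 누적
--
--         if sum(arr[n-1]):    # 마지막 라인에 12시를 향하지 않는 시계가 존재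
--             continue    # pass
--         answer = min(answer, result)    # 시계가 모두 12시를 가리킨다면 answer을 최솟값으로 갱신
--
--     return answer
-- ===== SOURCE B (Python) =====
-- def solution(clockHands):
--     INF = 9876543210
--     n = len(clockHands)
--
--     def spin(grid, y, x, t):
--         # new grid with the cross centred at (y, x) rotated t extra times
--         out = [row[:] for row in grid]
--         for yy, xx in ((y - 1, x), (y + 1, x), (y, x - 1), (y, x + 1), (y, x)):
--             if 0 <= yy < n and 0 <= xx < n:
--                 out[yy][xx] = (out[yy][xx] + t) % 4
--         return out
--
--     def settle(grid, i, cost):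
--         # rows above i-1 are already at 12 o'clock; force row i-1, recurse down
--         if i == n:
--             return cost if sum(grid[n - 1]) == 0 else INF
--         g = grid
--         for j in range(n):
--             v = g[i - 1][j]
--             if v:
--                 t = 4 - v
--                 g = spin(g, i, j, t)
--                 cost += t
--         return settle(g, i + 1, cost)
--
--     def assign(j, grid, cost):
--         # pick a rotation for first-row column j, threading grid and cost
--         if j == n:
--             return settle(grid, 1, cost)
--         return min(assign(j + 1, spin(grid, 0, j, t), cost + t) for t in range(4))
--
--     return min(INF, assign(0, clockHands, 0))
-- ===== Notes on version B (the rewrite author's own statement) =====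
-- stated objective: alternative
-- what changed: Replaces the flat itertools.product enumeration plus in-place grid mutation by a DFS that assigns one first-row rotation per column, threading the partially rotated grid and partial cost as accumulators, with a purely functional spin/settle recursion instead of the mutating rotate helper.
import Mathlib
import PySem

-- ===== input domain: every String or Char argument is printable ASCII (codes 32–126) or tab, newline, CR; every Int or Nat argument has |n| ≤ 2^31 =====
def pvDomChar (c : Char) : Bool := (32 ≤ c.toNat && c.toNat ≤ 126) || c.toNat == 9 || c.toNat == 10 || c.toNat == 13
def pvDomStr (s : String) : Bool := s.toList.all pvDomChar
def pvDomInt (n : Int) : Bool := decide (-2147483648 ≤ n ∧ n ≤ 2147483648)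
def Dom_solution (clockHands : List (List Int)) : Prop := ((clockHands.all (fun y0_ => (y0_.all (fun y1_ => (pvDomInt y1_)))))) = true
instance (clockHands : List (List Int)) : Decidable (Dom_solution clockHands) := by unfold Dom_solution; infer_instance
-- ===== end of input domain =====

-- B replaces the flat itertools.product enumeration of first-row rotations by a DFS that
-- threads the partially-rotated grid and partial cost, with a purely functional settle/spin
-- (no in-place mutation); objective: alternative decomposition, same asymptotic cost.

-- shared cell primitives: Python's 'if 0 <= y < n and 0 <= x < n: arr[y][x] = (arr[y][x] + t) % 4'
def cellGet (arr : List (List Int)) (y x : Int) : Int :=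
  PySem.List.pyGetD (PySem.List.pyGetD arr y []) x 0

def cellBump (n : Int) (arr : List (List Int)) (y x t : Int) : List (List Int) :=
  if 0 ≤ y ∧ y < n ∧ 0 ≤ x ∧ x < n then
    PySem.List.pySetD arr y
      (PySem.List.pySetD (PySem.List.pyGetD arr y []) x (PySem.Int.mod (cellGet arr y x + t) 4))
  else arr

-- ===== PORT A =====
-- rotate(a, b, t, arr): for k in range(5) over the dy/dx offset tables
def rotateA (n a b t : Int) (arr : List (List Int)) : List (List Int) :=
  (PySem.List.pyRange 0 5 1).foldl (fun arr k =>
    cellBump n arr (a + PySem.List.pyGetD ([-1, 1, 0, 0, 0] : List Int) k 0)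
                   (b + PySem.List.pyGetD ([0, 0, -1, 1, 0] : List Int) k 0) t) arr

-- itertools.product(range(4), repeat=m), in product order (first coordinate slowest)
def prodCases : Nat → List (List Int)
  | 0 => [[]]
  | m + 1 => (PySem.List.pyRange 0 4 1).flatMap (fun t => (prodCases m).map (fun c => t :: c))

-- the body of A's 'for case in product(...)' loop
def stepA (clockHands : List (List Int)) (answer : Int) (case_ : List Int) : Int :=
  let n : Int := clockHands.length
  let arr := clockHands.map (fun i => i)          -- arr = [i[:] for i in clockHands]
  let arr := (PySem.List.pyRange 0 n 1).foldl
      (fun arr j => rotateA n 0 j (PySem.List.pyGetD case_ j 0) arr) arr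
  let st := (PySem.List.pyRange 1 n 1).foldl
      (fun st i => (PySem.List.pyRange 0 n 1).foldl
        (fun (st : List (List Int) × Int) j =>    -- if arr[i-1][j]: temp = 4 - arr[i-1][j]; …
          if cellGet st.1 (i - 1) j ≠ 0 then
            (rotateA n i j (4 - cellGet st.1 (i - 1) j) st.1, st.2 + (4 - cellGet st.1 (i - 1) j))
          else st) st)
      (arr, case_.sum)                            -- result = sum(case)
  if (PySem.List.pyGetD st.1 (n - 1) []).sum ≠ 0 then answer else min answer st.2

def solution (clockHands : List (List Int)) : Int :=
  (prodCases clockHands.length).foldl (stepA clockHands) 9876543210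

-- ===== PORT B =====
-- spin(grid, y, x, t): new grid with the cross at (y, x) rotated t extra times
def spinB (n : Int) (grid : List (List Int)) (y x t : Int) : List (List Int) :=
  ([(y - 1, x), (y + 1, x), (y, x - 1), (y, x + 1), (y, x)] : List (Int × Int)).foldl
    (fun out p => cellBump n out p.1 p.2 t) grid

-- settle(grid, i, cost): rem = n - i rows still to force; base i == n checks the last row
def settleB (n : Int) : Nat → List (List Int) → Int → Int
  | 0, grid, cost =>
      if (PySem.List.pyGetD grid (n - 1) []).sum = 0 then cost else 9876543210
  | rem + 1, grid, cost =>
      let i : Int := n - (rem + 1)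
      let st := (PySem.List.pyRange 0 n 1).foldl
        (fun (st : List (List Int) × Int) j =>
          if cellGet st.1 (i - 1) j ≠ 0 then
            (spinB n st.1 i j (4 - cellGet st.1 (i - 1) j), st.2 + (4 - cellGet st.1 (i - 1) j))
          else st) (grid, cost)
      settleB n rem st.1 st.2

-- assign(j, grid, cost): rem = n - j columns of the first row still to choose
def assignB (n : Int) : Nat → List (List Int) → Int → Int
  | 0, grid, cost => settleB n (n - 1).toNat grid cost
  | rem + 1, grid, cost =>
      let j : Int := n - (rem + 1)
      (PySem.List.min? ((PySem.List.pyRange 0 4 1).map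
          (fun t => assignB n rem (spinB n grid 0 j t) (cost + t))) (fun y => y)).getD 0

def solution_alt (clockHands : List (List Int)) : Int :=
  let n : Int := clockHands.length
  min 9876543210 (assignB n clockHands.length clockHands 0)

-- ===== PRECONDITION & SPEC =====
-- exactly where the Python A returns: it indexes arr[n-1] (IndexError on []) and writes every
-- column 0..n-1 of the touched rows (IndexError whenever some row is shorter than n)
def Pre_solution (clockHands : List (List Int)) : Prop :=
  clockHands ≠ [] ∧ ∀ row ∈ clockHands, clockHands.length ≤ row.length
instance (clockHands : List (List Int)) : Decidable (Pre_solution clockHands) := by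
  unfold Pre_solution; infer_instance

def pvWitness_solution : List (List Int) := [[1, 2], [3, 0]]

def Spec_solution (clockHands : List (List Int)) (out : Int) : Prop := out = solution_alt clockHands
instance (clockHands : List (List Int)) (out : Int) : Decidable (Spec_solution clockHands out) := by
  unfold Spec_solution; infer_instance

-- ===== CLAIM (what is proved, stated in full; the proofs are below) =====
def Claim_equal_solution : Prop := ∀ (clockHands : List (List Int)), Dom_solution clockHands → Pre_solution clockHands → Spec_solution clockHands (solution clockHands)

-- ===== LEMMAS AND PROOFS =====

theorem rot_eq_spin (n a b t : Int) (arr : List (List Int)) :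
    rotateA n a b t arr = spinB n arr a b t := by
  have h5 : PySem.List.pyRange 0 5 1 = [0, 1, 2, 3, 4] := by decide
  simp only [rotateA, spinB, h5, List.foldl_cons, List.foldl_nil]
  norm_num [PySem.List.pyGetD, show ((2:Int).toNat) = 2 from rfl,
    show ((3:Int).toNat) = 3 from rfl, show ((4:Int).toNat) = 4 from rfl, ← sub_eq_add_neg]

-- proof-side: the grid after spinning first-row columns j0, j0+1, … by the listed amounts
def applyF (n : Int) : Int → List Int → List (List Int) → List (List Int)
  | _, [], g => g
  | j0, t :: c, g => applyF n (j0 + 1) c (spinB n g 0 j0 t)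

theorem prodCases_length {m : Nat} {c : List Int} (hc : c ∈ prodCases m) : c.length = m := by
  induction m generalizing c with
  | zero => simp [prodCases] at hc; simp [hc]
  | succ m ih =>
    simp only [prodCases, List.mem_flatMap, List.mem_map] at hc
    obtain ⟨t, -, c', hc', rfl⟩ := hc
    simp [ih hc']

theorem firstRow (n : Int) (case_ : List Int) (hn : (case_.length : Int) = n) :
    ∀ (suf : List Int) (k : Nat), case_.drop k = suf → ∀ g,
      (PySem.List.pyRange (k : Int) n 1).foldl
        (fun g j => spinB n g 0 j (PySem.List.pyGetD case_ j 0)) g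
      = applyF n (k : Int) suf g := by
  intro suf
  induction suf with
  | nil =>
    intro k hk g
    have hlen : case_.length ≤ k := by
      by_contra h
      have := List.drop_eq_nil_iff.mp hk
      omega
    rw [PySem.List.pyRange_one_eq_nil (by omega)]
    rfl
  | cons t c ih =>
    intro k hk g
    have hklt : k < case_.length := by
      by_contra h
      rw [List.drop_eq_nil_of_le (by omega)] at hk
      simp at hk
    have hget : case_.getD k 0 = t := by
      have h0 : case_[k]? = (case_.drop k)[0]? := by
        simp [List.getElem?_drop]
      rw [hk] at h0
      simp [List.getD, h0]
    have hdrop : case_.drop (k + 1) = c := by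
      have : case_.drop (k + 1) = (case_.drop k).tail := by
        rw [← List.drop_drop]
        simp
      rw [this, hk]
      rfl
    rw [PySem.List.pyRange_one_cons (by omega), List.foldl_cons]
    simp only [PySem.List.pyGetD_natCast, hget]
    have := ih (k + 1) hdrop (spinB n g 0 (↑k) t)
    push_cast at this ⊢
    rw [this]
    rfl

theorem settle_eq_fold (n : Int) : ∀ (rem : Nat) (g : List (List Int)) (cost : Int),
    settleB n rem g cost =
      (if (PySem.List.pyGetD ((PySem.List.pyRange (n - rem) n 1).foldl
        (fun st i => (PySem.List.pyRange 0 n 1).foldl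
          (fun (st : List (List Int) × Int) j =>
            if cellGet st.1 (i - 1) j ≠ 0 then
              (spinB n st.1 i j (4 - cellGet st.1 (i - 1) j), st.2 + (4 - cellGet st.1 (i - 1) j))
            else st) st) (g, cost)).1 (n - 1) []).sum = 0
       then ((PySem.List.pyRange (n - rem) n 1).foldl
        (fun st i => (PySem.List.pyRange 0 n 1).foldl
          (fun (st : List (List Int) × Int) j =>
            if cellGet st.1 (i - 1) j ≠ 0 then
              (spinB n st.1 i j (4 - cellGet st.1 (i - 1) j), st.2 + (4 - cellGet st.1 (i - 1) j))
            else st) st) (g, cost)).2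
       else 9876543210) := by
  intro rem
  induction rem with
  | zero =>
    intro g cost
    have h0 : PySem.List.pyRange (n - ((0:Nat):Int)) n 1 = [] := by
      apply PySem.List.pyRange_one_eq_nil
      push_cast
      omega
    rw [h0]
    simp only [List.foldl_nil]
    rfl
  | succ rem ih =>
    intro g cost
    have hcons : PySem.List.pyRange (n - ((rem:Int) + 1)) n 1
        = (n - ((rem:Int) + 1)) :: PySem.List.pyRange (n - (rem:Int)) n 1 := by
      rw [PySem.List.pyRange_one_cons (by omega),
        show n - ((rem:Int) + 1) + 1 = n - (rem:Int) by omega]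
    simp only [settleB]
    push_cast
    rw [hcons, List.foldl_cons, ih]

theorem assign_eq (n : Int) : ∀ (rem : Nat) (g : List (List Int)) (cost x : Int),
    min x (assignB n rem g cost) =
      ((prodCases rem).map
        (fun c => settleB n (n - 1).toNat (applyF n (n - rem) c g) (cost + c.sum))).foldl min x := by
  intro rem
  induction rem with
  | zero =>
    intro g cost x
    simp [assignB, prodCases, applyF]
  | succ rem ih =>
    intro g cost x
    have h4 : PySem.List.pyRange 0 4 1 = [0, 1, 2, 3] := by decide
    rw [assignB]
    push_cast
    rw [h4]
    simp only [List.map_cons, List.map_nil, PySem.List.min?_id_cons, Option.getD_some,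
      List.foldl_cons, List.foldl_nil]
    rw [show prodCases (rem + 1)
        = (PySem.List.pyRange 0 4 1).flatMap (fun t => (prodCases rem).map (fun c => t :: c)) from rfl, h4]
    simp only [List.flatMap_cons, List.flatMap_nil, List.append_nil, List.map_append,
      List.map_map, List.foldl_append]
    have hcomp : ∀ t : Int, ((fun c => settleB n (n - 1).toNat
        (applyF n (n - ((rem:Int) + 1)) c g) (cost + c.sum)) ∘ (fun c => t :: c))
        = (fun c => settleB n (n - 1).toNat
            (applyF n (n - (rem:Int)) c (spinB n g 0 (n - ((rem:Int) + 1)) t)) ((cost + t) + c.sum)) := by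
      intro t
      funext c
      simp only [Function.comp]
      rw [applyF, show n - ((rem:Int) + 1) + 1 = n - (rem:Int) by omega, List.sum_cons,
        ← add_assoc]
    rw [hcomp 0, hcomp 1, hcomp 2, hcomp 3]
    rw [← ih, ← ih, ← ih, ← ih]
    simp [min_assoc]

theorem step_eq (clockHands : List (List Int)) (hn : 1 ≤ (clockHands.length : Int))
    (c : List Int) (hc : c.length = clockHands.length) (a : Int) (ha : a ≤ 9876543210) :
    stepA clockHands a c =
      min a (settleB (clockHands.length : Int) ((clockHands.length : Int) - 1).toNat
        (applyF (clockHands.length : Int) 0 c clockHands) c.sum) := by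
  have hfr := firstRow (clockHands.length : Int) c (by exact_mod_cast hc) c 0
    (by simp) clockHands
  push_cast at hfr
  have hst := settle_eq_fold (clockHands.length : Int)
    ((clockHands.length : Int) - 1).toNat (applyF (clockHands.length : Int) 0 c clockHands) c.sum
  rw [show (clockHands.length : Int) - (((clockHands.length : Int) - 1).toNat : Int) = 1
    by omega] at hst
  simp only [stepA, rot_eq_spin, List.map_id']
  rw [hfr, hst]
  split_ifs with h1 h2 <;> first | rfl | exact (min_eq_left ha).symm | tauto

theorem foldA (clockHands : List (List Int)) (hn : 1 ≤ (clockHands.length : Int)) :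
    ∀ (l : List (List Int)), (∀ c ∈ l, c.length = clockHands.length) →
    ∀ a : Int, a ≤ 9876543210 →
      l.foldl (stepA clockHands) a =
      (l.map (fun c => settleB (clockHands.length : Int) ((clockHands.length : Int) - 1).toNat
          (applyF (clockHands.length : Int) 0 c clockHands) c.sum)).foldl min a := by
  intro l
  induction l with
  | nil => intro _ a _; rfl
  | cons c l ih =>
    intro hlen a ha
    rw [List.foldl_cons, List.map_cons, List.foldl_cons,
      step_eq clockHands hn c (hlen c (by simp)) a ha]
    exact ih (fun c' hc' => hlen c' (by simp [hc'])) _ (le_trans (min_le_left _ _) ha)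

-- ===== VERDICT (by name: the statement is the Claim_ definition above) =====
theorem solution_spec : Claim_equal_solution := by
  intro ch _ hpre
  unfold Spec_solution
  obtain ⟨hne, -⟩ := hpre
  have hn : 1 ≤ (ch.length : Int) := by
    cases ch with
    | nil => exact absurd rfl hne
    | cons h t => simp
  unfold solution solution_alt
  have hasn := assign_eq (ch.length : Int) ch.length ch 0 9876543210
  rw [show (ch.length : Int) - ((ch.length : Nat) : Int) = 0 by omega] at hasn
  have hmap : (prodCases ch.length).map (fun c =>
        settleB (ch.length : Int) ((ch.length : Int) - 1).toNat (applyF (ch.length : Int) 0 c ch) (0 + c.sum))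
      = (prodCases ch.length).map (fun c =>
        settleB (ch.length : Int) ((ch.length : Int) - 1).toNat (applyF (ch.length : Int) 0 c ch) c.sum) := by
    apply List.map_congr_left
    intro c _
    rw [zero_add]
  simp only []
  rw [hasn, hmap, foldA ch hn (prodCases ch.length) (fun c hc => prodCases_length hc)
    9876543210 le_rfl]
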